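-- pv_equiv track=rewrite | github.com/LegendaryCorn/Resilient_MTSP | solvers/solver_pstcxga.py | path_to_chrom
-- ===== SOURCE A (Python) =====
-- def path_to_chrom(paths):
--
--     chrom = []
--     for path in paths:
--         for i in path:
--             chrom.append(i)
--
--     chrom.append(-1)
--     for path in paths:
--         chrom.append(len(path))
--
--     return chrom
-- ===== SOURCE B (Python) =====
-- def path_to_chrom(paths):
--     def rec(ps):
--         # returns (flatten(ps), lengths(ps)) by structural recursion on ps
--         if not ps:
--             return ([], [])
--         flat, lens = rec(ps[1:])
--         return (ps[0] + flat, [len(ps[0])] + lens)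
--     flat, lens = rec(paths)
--     return flat + [-1] + lens
-- ===== Notes on version B (the rewrite author's own statement) =====
-- stated objective: alternative
-- what changed: B replaces A's imperative staged append loops with a structural recursion on the list of paths that builds both the flattened elements and the length list from the tail's recursive result, combining them around the -1 separator at the end.
import Mathlib
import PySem

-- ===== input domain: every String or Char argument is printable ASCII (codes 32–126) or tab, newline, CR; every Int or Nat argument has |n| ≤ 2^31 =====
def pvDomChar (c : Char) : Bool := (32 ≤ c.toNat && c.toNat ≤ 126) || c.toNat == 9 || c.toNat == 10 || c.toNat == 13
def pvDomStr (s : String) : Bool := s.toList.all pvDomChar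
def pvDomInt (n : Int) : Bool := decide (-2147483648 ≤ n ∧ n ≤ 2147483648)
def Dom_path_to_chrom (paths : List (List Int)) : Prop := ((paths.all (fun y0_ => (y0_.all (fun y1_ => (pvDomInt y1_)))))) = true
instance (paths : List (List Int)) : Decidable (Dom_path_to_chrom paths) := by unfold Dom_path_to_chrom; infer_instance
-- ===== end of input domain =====

-- B replaces A's imperative staged append loops with a structural recursion that builds the flattened elements and the length list from the tail's recursive result; objective: alternative.


-- ===== PORT A =====
-- chrom = []; for path in paths: for i in path: chrom.append(i); chrom.append(-1); for path in paths: chrom.append(len(path))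
def path_to_chrom (paths : List (List Int)) : List Int :=
  let chrom : List Int := []
  let chrom := paths.foldl (fun chrom path => path.foldl (fun chrom i => chrom ++ [i]) chrom) chrom
  let chrom := chrom ++ [(-1 : Int)]
  let chrom := paths.foldl (fun chrom path => chrom ++ [(path.length : Int)]) chrom
  chrom

-- ===== PORT B =====
-- rec(ps): ([], []) on empty; else (ps[0] + flat, [len(ps[0])] + lens) from rec(ps[1:])
def pathToChromRec : List (List Int) → List Int × List Int
  | [] => ([], [])
  | p :: ps =>
    let fl := pathToChromRec ps
    (p ++ fl.1, ((p.length : Int)) :: fl.2)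

def path_to_chrom_alt (paths : List (List Int)) : List Int :=
  let fl := pathToChromRec paths
  fl.1 ++ [(-1 : Int)] ++ fl.2

-- ===== PRECONDITION & SPEC =====
def Spec_path_to_chrom (paths : List (List Int)) (out : List Int) : Prop := out = path_to_chrom_alt paths
instance (paths : List (List Int)) (out : List Int) : Decidable (Spec_path_to_chrom paths out) := by unfold Spec_path_to_chrom; infer_instance

-- ===== CLAIM (what is proved, stated in full; the proofs are below) =====
def Claim_equal_path_to_chrom : Prop := ∀ (paths : List (List Int)), Dom_path_to_chrom paths → Spec_path_to_chrom paths (path_to_chrom paths)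

-- ===== LEMMAS AND PROOFS =====

-- appending element-by-element is appending the whole list
lemma foldl_append_singleton (path : List Int) : ∀ (c : List Int),
    path.foldl (fun chrom i => chrom ++ [i]) c = c ++ path := by
  induction path with
  | nil => intro c; simp
  | cons x xs ih => intro c; simp [List.foldl, ih]

-- A's first loop flattens
lemma flat_fold (paths : List (List Int)) : ∀ (c : List Int),
    paths.foldl (fun chrom path => path.foldl (fun chrom i => chrom ++ [i]) chrom) c
      = c ++ paths.flatten := by
  induction paths with
  | nil => intro c; simp
  | cons p ps ih => intro c; rw [List.foldl_cons, foldl_append_singleton, ih, List.flatten_cons, List.append_assoc]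

-- A's second loop appends the lengths
lemma len_fold (paths : List (List Int)) : ∀ (c : List Int),
    paths.foldl (fun chrom path => chrom ++ [(path.length : Int)]) c
      = c ++ paths.map (fun p => (p.length : Int)) := by
  induction paths with
  | nil => intro c; simp
  | cons p ps ih => intro c; simp [List.foldl, ih]

-- B's recursion computes the flattening and the length list componentwise
lemma rec_eq (paths : List (List Int)) :
    pathToChromRec paths = (paths.flatten, paths.map (fun p => (p.length : Int))) := by
  induction paths with
  | nil => simp [pathToChromRec]
  | cons p ps ih => simp [pathToChromRec, ih]

-- ===== VERDICT (by name: the statement is the Claim_ definition above) =====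
theorem path_to_chrom_spec : Claim_equal_path_to_chrom := by
  intro paths _
  show _ = _
  simp only [path_to_chrom, path_to_chrom_alt]
  rw [flat_fold, len_fold, rec_eq]
  simp
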